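-- pv_equiv track=rewrite | github.com/vucml/online_experiments | experiments/block_cat/block_cat.py | generate_valid_combinations
-- ===== SOURCE A (Python) =====
-- import itertools
--
-- def generate_valid_combinations(
--     middle_indices: list[int], cue_count: int, spacing: int
-- ) -> list[tuple[int, ...]]:
--     """
--     Generate all possible valid combinations of cued indices that satisfy the spacing constraint.
--
--     Args:
--         middle_indices: A list of indices from which the cues are drawn.
--         cue_count: The number of cues required for each trial.
--         spacing: The minimum spacing between cued indices.
--
--     Returns:
--         A list of tuples, each representing a valid combination of indices that satisfy the spacing constraint.
--     """
--     return [
--         combo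
--         for combo in itertools.combinations(middle_indices, cue_count)
--         if all(combo[i + 1] - combo[i] >= spacing + 1 for i in range(len(combo) - 1))
--     ]
-- ===== SOURCE B (Python) =====
-- def generate_valid_combinations(
--     middle_indices: list[int], cue_count: int, spacing: int
-- ) -> list[tuple[int, ...]]:
--     """DFS that extends a partial combination only with elements respecting the
--     spacing constraint, so invalid combinations are pruned instead of generated
--     and filtered."""
--
--     def dfs(k, last, xs):
--         if k == 0:
--             return [()]
--         out = []
--         for i, x in enumerate(xs):
--             if last is None or x - last >= spacing + 1:
--                 for tail in dfs(k - 1, x, xs[i + 1:]):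
--                     out.append((x,) + tail)
--         return out
--
--     return dfs(cue_count, None, middle_indices)
-- ===== Notes on version B (the rewrite author's own statement) =====
-- stated objective: faster
-- what changed: Replaced generate-all-C(n,k)-combinations-then-filter with a DFS that extends a partial combination only with elements satisfying the spacing constraint, so invalid branches are pruned instead of generated.
import Mathlib
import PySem

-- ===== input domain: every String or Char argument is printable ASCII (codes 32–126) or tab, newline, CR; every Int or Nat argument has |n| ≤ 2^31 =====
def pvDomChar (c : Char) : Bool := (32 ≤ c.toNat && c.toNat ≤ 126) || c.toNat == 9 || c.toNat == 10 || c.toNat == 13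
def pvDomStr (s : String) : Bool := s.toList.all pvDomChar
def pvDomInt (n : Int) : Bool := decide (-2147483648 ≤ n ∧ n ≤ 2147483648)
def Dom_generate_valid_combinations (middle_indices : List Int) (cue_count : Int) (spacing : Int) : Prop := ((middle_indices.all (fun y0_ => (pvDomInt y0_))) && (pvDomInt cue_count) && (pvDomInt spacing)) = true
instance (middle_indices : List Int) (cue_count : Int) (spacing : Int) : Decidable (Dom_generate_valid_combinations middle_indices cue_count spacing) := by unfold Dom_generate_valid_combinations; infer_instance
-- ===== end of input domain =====

-- B replaces A's generate-all-combinations-then-filter with a pruned DFS that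
-- only extends spacing-valid partial combinations (output-sensitive, faster).


-- ===== PORT A =====
-- itertools.combinations(xs, k): k-subsequences of xs in lexicographic order of positions.
def pvCombos (k : Nat) (xs : List Int) : List (List Int) :=
  match k, xs with
  | 0, _ => [[]]
  | _ + 1, [] => []
  | k + 1, x :: rest => (pvCombos k rest).map (fun c => x :: c) ++ pvCombos (k + 1) rest

-- all(combo[i+1] - combo[i] >= spacing + 1 for i in range(len(combo) - 1));
-- indices i and i+1 are always in range, so getD is exact here.
def pvValidA (spacing : Int) (combo : List Int) : Bool :=
  (List.range (combo.length - 1)).all fun i =>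
    decide (combo.getD (i + 1) 0 - combo.getD i 0 ≥ spacing + 1)

def generate_valid_combinations (middle_indices : List Int) (cue_count : Int) (spacing : Int) : List (List Int) :=
  (pvCombos cue_count.toNat middle_indices).filter (pvValidA spacing)

-- ===== PORT B =====
-- 'last is None or x - last >= spacing + 1'
def pvOkB (spacing : Int) : Option Int → Int → Bool
  | none, _ => true
  | some l, x => decide (x - l ≥ spacing + 1)

-- dfs(k, last, xs): the loop over enumerate(xs) is the include-x branch (with
-- xs[i+1:]) followed by the same dfs on the remaining suffix.
def pvDfsB (spacing : Int) (k : Int) (last : Option Int) (xs : List Int) : List (List Int) :=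
  if k == 0 then [[]]
  else
    match xs with
    | [] => []
    | x :: rest =>
      (if pvOkB spacing last x then (pvDfsB spacing (k - 1) (some x) rest).map (fun c => x :: c) else [])
        ++ pvDfsB spacing k last rest

def generate_valid_combinations_alt (middle_indices : List Int) (cue_count : Int) (spacing : Int) : List (List Int) :=
  pvDfsB spacing cue_count none middle_indices

-- ===== PRECONDITION & SPEC =====
-- A raises ValueError when cue_count < 0 (itertools.combinations rejects negative r).
def Pre_generate_valid_combinations (middle_indices : List Int) (cue_count : Int) (spacing : Int) : Prop :=
  0 ≤ cue_count
instance (middle_indices : List Int) (cue_count : Int) (spacing : Int) : Decidable (Pre_generate_valid_combinations middle_indices cue_count spacing) := by unfold Pre_generate_valid_combinations; infer_instance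

def pvWitness_generate_valid_combinations : List Int × Int × Int := ([1, 3, 5], 2, 1)

def Spec_generate_valid_combinations (middle_indices : List Int) (cue_count : Int) (spacing : Int) (out : List (List Int)) : Prop := out = generate_valid_combinations_alt middle_indices cue_count spacing
instance (middle_indices : List Int) (cue_count : Int) (spacing : Int) (out : List (List Int)) : Decidable (Spec_generate_valid_combinations middle_indices cue_count spacing out) := by unfold Spec_generate_valid_combinations; infer_instance

-- ===== CLAIM (what is proved, stated in full; the proofs are below) =====
def Claim_equal_generate_valid_combinations : Prop := ∀ (middle_indices : List Int) (cue_count : Int) (spacing : Int), Dom_generate_valid_combinations middle_indices cue_count spacing → Pre_generate_valid_combinations middle_indices cue_count spacing → Spec_generate_valid_combinations middle_indices cue_count spacing (generate_valid_combinations middle_indices cue_count spacing)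


-- ===== LEMMAS AND PROOFS =====

-- chain check growing from an optional previous element
def pvChain (spacing : Int) : Option Int → List Int → Bool
  | _, [] => true
  | last, x :: xs => pvOkB spacing last x && pvChain spacing (some x) xs

lemma pvValidA_cons (s : Int) (x : Int) (xs : List Int) :
    pvValidA s (x :: xs) = pvChain s (some x) xs := by
  induction xs generalizing x with
  | nil => simp [pvValidA, pvChain]
  | cons y rest ih =>
    have h := ih y
    simp only [pvValidA, pvChain, pvOkB, List.length_cons, Nat.add_sub_cancel,
      List.range_succ_eq_map, List.all_cons, List.all_map] at h ⊢
    simp only [Function.comp_def, List.getD, List.getElem?_cons_zero,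
      List.getElem?_cons_succ, Option.getD_some] at h ⊢
    congr 1

lemma pvValidA_eq_chain (s : Int) (c : List Int) :
    pvValidA s c = pvChain s none c := by
  cases c with
  | nil => simp [pvValidA, pvChain]
  | cons x xs => rw [pvValidA_cons]; simp [pvChain, pvOkB]

lemma filter_combos_eq_dfs (s : Int) :
    ∀ (xs : List Int) (k : Nat) (last : Option Int),
      (pvCombos k xs).filter (pvChain s last) = pvDfsB s (k : Int) last xs := by
  intro xs
  induction xs with
  | nil =>
    intro k last
    cases k with
    | zero => simp [pvCombos, pvDfsB, pvChain]
    | succ k => simp [pvCombos, pvDfsB]; omega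
  | cons x rest ih =>
    intro k last
    cases k with
    | zero => simp [pvCombos, pvDfsB, pvChain]
    | succ k =>
      have hk : ((k : Int) + 1) - 1 = (k : Int) := by omega
      have hne : ((k : Int) + 1 == 0) = false := by
        rw [beq_eq_false_iff_ne]; omega
      rw [pvDfsB]
      simp only [Nat.cast_add, Nat.cast_one, hne, Bool.false_eq_true, if_false, hk]
      have h2 := ih (k + 1) last
      push_cast at h2
      rw [pvCombos, List.filter_append, List.filter_map, ← ih, h2]
      by_cases hok : pvOkB s last x = true
      · simp only [hok, if_true]
        congr 1
        refine congrArg (List.map _) (List.filter_congr ?_)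
        intro c _
        simp [Function.comp, pvChain, hok]
      · simp only [Bool.not_eq_true] at hok
        simp only [hok, Bool.false_eq_true, if_false]
        have : (List.filter (pvChain s last ∘ fun c => x :: c) (pvCombos k rest)) = [] := by
          apply List.filter_eq_nil_iff.mpr
          intro c _
          simp [Function.comp, pvChain, hok]
        rw [this]
        simp

-- ===== VERDICT (by name: the statement is the Claim_ definition above) =====
theorem generate_valid_combinations_spec : Claim_equal_generate_valid_combinations := by
  intro mi cc sp _ hpre
  unfold Spec_generate_valid_combinations generate_valid_combinations generate_valid_combinations_alt
  rw [List.filter_congr (fun c _ => pvValidA_eq_chain sp c), filter_combos_eq_dfs]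
  rw [Int.toNat_of_nonneg hpre]
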